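-- pv_equiv track=rewrite | github.com/alantao5056/Hackerrank | contests/HackTheInterview2-US/MaximumStreaks/streaks.py | getMaxHeadStreaks
-- ===== SOURCE A (Python) =====
-- def getMaxHeadStreaks(toss):
--   maxStreak = 0
--   curStreak = 0
--   for t in toss:
--     if t != 'Heads':
--       maxStreak = max(maxStreak, curStreak)
--       curStreak = 0
--     else:
--       curStreak += 1
--   return max(maxStreak, curStreak)
-- ===== SOURCE B (Python) =====
-- def getMaxHeadStreaks(toss):
--     breaks = [i for i, t in enumerate(toss) if t != 'Heads']
--     bounds = [-1] + breaks + [len(toss)]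
--     return max(b - a - 1 for a, b in zip(bounds, bounds[1:]))
-- ===== Notes on version B (the rewrite author's own statement) =====
-- stated objective: alternative
-- what changed: Replaces the two-counter (curStreak/maxStreak) scan by a positional decomposition: collect the indices of all non-'Heads' elements, pad with -1 and len(toss), and return the maximum gap between consecutive break positions.
import Mathlib
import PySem

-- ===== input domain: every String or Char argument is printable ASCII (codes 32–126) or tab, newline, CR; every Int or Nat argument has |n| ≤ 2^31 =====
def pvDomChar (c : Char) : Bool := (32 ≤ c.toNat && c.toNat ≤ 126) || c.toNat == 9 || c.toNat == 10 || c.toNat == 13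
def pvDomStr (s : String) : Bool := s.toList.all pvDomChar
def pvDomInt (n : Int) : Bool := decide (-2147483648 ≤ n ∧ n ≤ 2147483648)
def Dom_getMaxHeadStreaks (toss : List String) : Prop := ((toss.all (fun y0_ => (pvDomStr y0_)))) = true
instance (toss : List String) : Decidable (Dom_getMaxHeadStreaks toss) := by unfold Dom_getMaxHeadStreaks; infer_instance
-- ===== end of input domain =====

-- B replaces A's two-counter scan by break positions: max gap between consecutive non-'Heads'
-- indices (padded with -1 and len); same O(n) cost, different decomposition ("alternative").

-- ===== PORT A =====
def getMaxHeadStreaks (toss : List String) : Int :=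
  let p := toss.foldl
    (fun (st : Int × Int) t =>
      if t ≠ "Heads" then (max st.1 st.2, 0) else (st.1, st.2 + 1))
    (0, 0)
  max p.1 p.2

-- ===== PORT B =====
def getMaxHeadStreaks_alt (toss : List String) : Int :=
  let breaks := ((PySem.List.enumerate toss 0).filter (fun p => decide (p.2 ≠ "Heads"))).map (fun p => p.1)
  let bounds := [(-1 : Int)] ++ breaks ++ [PySem.List.len toss]
  let gaps := (bounds.zip (PySem.List.slice bounds (some 1) none)).map (fun p => p.2 - p.1 - 1)
  match gaps with
  | [] => 0                      -- unreachable: bounds always has ≥ 2 elements, Python's max never sees an empty iterable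
  | h :: t => t.foldl max h

-- ===== PRECONDITION & SPEC =====
def Spec_getMaxHeadStreaks (toss : List String) (out : Int) : Prop := out = getMaxHeadStreaks_alt toss
instance (toss : List String) (out : Int) : Decidable (Spec_getMaxHeadStreaks toss out) := by unfold Spec_getMaxHeadStreaks; infer_instance

-- ===== CLAIM (what is proved, stated in full; the proofs are below) =====
def Claim_equal_getMaxHeadStreaks : Prop := ∀ (toss : List String), Dom_getMaxHeadStreaks toss → Spec_getMaxHeadStreaks toss (getMaxHeadStreaks toss)

-- ===== LEMMAS AND PROOFS =====

-- gap list of a bounds list, as structural recursion (equal to the port's zip/map form)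
def pvGaps : List Int → List Int
  | a :: b :: rest => (b - a - 1) :: pvGaps (b :: rest)
  | _ => []

lemma pvGaps_eq_zip (l : List Int) :
    (l.zip l.tail).map (fun p => p.2 - p.1 - 1) = pvGaps l := by
  match l with
  | [] => simp [pvGaps]
  | [a] => simp [pvGaps]
  | a :: b :: rest =>
    simp only [List.tail_cons, List.zip_cons_cons, List.map_cons, pvGaps]
    exact congrArg _ (pvGaps_eq_zip (b :: rest))

-- break positions of xs, enumerated from s
def pvBrk (s : Int) (xs : List String) : List Int :=
  ((PySem.List.enumerate xs s).filter (fun p => decide (p.2 ≠ "Heads"))).map (fun p => p.1)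

lemma pvBrk_cons (s : Int) (t : String) (xs : List String) :
    pvBrk s (t :: xs) =
      (if t ≠ "Heads" then [s] else []) ++ pvBrk (s + 1) xs := by
  simp [pvBrk, PySem.List.enumerate]
  split_ifs with h <;> simp [h]

lemma pvMain (xs : List String) : ∀ (s prev m : Int),
    (pvGaps (prev :: pvBrk s xs ++ [s + (xs.length : Int)])).foldl max m
      = (let p := xs.foldl
          (fun (st : Int × Int) t =>
            if t ≠ "Heads" then (max st.1 st.2, 0) else (st.1, st.2 + 1))
          (m, s - prev - 1);
         max p.1 p.2) := by
  induction xs with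
  | nil => intro s prev m; simp [pvBrk, PySem.List.enumerate, pvGaps]
  | cons t rest ih =>
    intro s prev m
    rw [pvBrk_cons]
    have e1 : s + (((t :: rest).length : Nat) : Int) = (s + 1) + (rest.length : Int) := by
      simp only [List.length_cons]; push_cast; ring
    by_cases h : t = "Heads"
    · subst h
      simp only [ne_eq, not_true_eq_false, if_false, List.nil_append, List.foldl_cons]
      rw [e1]
      have e2 : s - prev - 1 + 1 = (s + 1) - prev - 1 := by ring
      rw [e2]
      simpa using ih (s + 1) prev m
    · simp only [if_pos (show t ≠ "Heads" from h), List.cons_append, List.nil_append, List.foldl_cons]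
      rw [e1]
      rw [show pvGaps (prev :: s :: (pvBrk (s + 1) rest ++ [(s + 1) + (rest.length : Int)]))
            = (s - prev - 1) :: pvGaps (s :: (pvBrk (s + 1) rest ++ [(s + 1) + (rest.length : Int)])) from rfl]
      rw [List.foldl_cons]
      have hih := ih (s + 1) s (max m (s - prev - 1))
      have e3 : s + 1 - s - 1 = (0 : Int) := by ring
      rw [e3] at hih
      simpa using hih

lemma pvBrk_head_ge (xs : List String) : ∀ (s b : Int), b ∈ pvBrk s xs → s ≤ b := by
  induction xs with
  | nil => intro s b hb; simp [pvBrk, PySem.List.enumerate] at hb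
  | cons t rest ih =>
    intro s b hb
    rw [pvBrk_cons] at hb
    rcases List.mem_append.1 hb with h1 | h2
    · split_ifs at h1 <;> simp at h1; omega
    · have := ih (s + 1) b h2; omega

-- ===== VERDICT (by name: the statement is the Claim_ definition above) =====
theorem getMaxHeadStreaks_spec : Claim_equal_getMaxHeadStreaks := by
  intro toss _
  unfold Spec_getMaxHeadStreaks getMaxHeadStreaks getMaxHeadStreaks_alt
  simp only [PySem.List.slice_from_one, PySem.List.len_eq]
  have hb : ([(-1 : Int)] ++ ((PySem.List.enumerate toss 0).filter
        (fun p => decide (p.2 ≠ "Heads"))).map (fun p => p.1) ++ [(toss.length : Int)])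
      = (-1) :: pvBrk 0 toss ++ [(toss.length : Int)] := rfl
  rw [hb, pvGaps_eq_zip]
  have hmain := pvMain toss 0 (-1) 0
  have e0 : (0 : Int) - (-1) - 1 = 0 := by ring
  rw [e0] at hmain
  simp only [zero_add] at hmain
  rcases hg : pvGaps ((-1) :: pvBrk 0 toss ++ [(toss.length : Int)]) with _ | ⟨h, t⟩
  · exfalso
    rcases hbk : pvBrk 0 toss with _ | ⟨b, bs⟩ <;> simp [hbk, pvGaps] at hg
  · have hh : 0 ≤ h := by
      rcases hbk : pvBrk 0 toss with _ | ⟨b, bs⟩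
      · simp [hbk, pvGaps] at hg
        omega
      · simp [hbk, pvGaps] at hg
        have := pvBrk_head_ge toss 0 b (by rw [hbk]; simp)
        omega
    rw [hg] at hmain
    simp only [List.foldl_cons] at hmain
    simp only []
    rw [← hmain]
    congr 1
    omega
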